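-- pv_equiv track=rewrite | github.com/Sanskriti-hello/disco | ignore/backend/domains/travel.py | _infer_preferences
-- ===== SOURCE A (Python) =====
-- from typing import Dict, List, Any, Optional
--
-- def _infer_preferences(browser_data: Dict[str, Any]) -> Dict[str, Any]:
--     """Infer travel preferences from browsing history."""
--     recent_searches = browser_data.get("recent_searches", [])
--
--     preferences = {
--         "prefersDirect": any("direct" in s.lower() or "nonstop" in s.lower() for s in recent_searches),
--         "budgetConscious": any("cheap" in s.lower() or "budget" in s.lower() for s in recent_searches),
--         "luxurySeeker": any("luxury" in s.lower() or "5 star" in s.lower() for s in recent_searches),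
--     }
--
--     return preferences
-- ===== SOURCE B (Python) =====
-- def _infer_preferences(browser_data):
--     """Infer travel preferences from browsing history."""
--     recent_searches = browser_data.get("recent_searches", [])
--     direct = cheap = lux = False
--     for s in recent_searches:
--         t = s.lower()
--         direct = direct or "direct" in t or "nonstop" in t
--         cheap = cheap or "cheap" in t or "budget" in t
--         lux = lux or "luxury" in t or "5 star" in t
--         if direct and cheap and lux:
--             break
--     return {
--         "prefersDirect": direct,
--         "budgetConscious": cheap,
--         "luxurySeeker": lux,
--     }
-- ===== Notes on version B (the rewrite author's own statement) =====
-- stated objective: alternative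
-- what changed: Replaces the three independent any(...) generator scans over recent_searches with a single loop that lowercases each search once, ORs three flags, and breaks early once all three flags are set.
import Mathlib
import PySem

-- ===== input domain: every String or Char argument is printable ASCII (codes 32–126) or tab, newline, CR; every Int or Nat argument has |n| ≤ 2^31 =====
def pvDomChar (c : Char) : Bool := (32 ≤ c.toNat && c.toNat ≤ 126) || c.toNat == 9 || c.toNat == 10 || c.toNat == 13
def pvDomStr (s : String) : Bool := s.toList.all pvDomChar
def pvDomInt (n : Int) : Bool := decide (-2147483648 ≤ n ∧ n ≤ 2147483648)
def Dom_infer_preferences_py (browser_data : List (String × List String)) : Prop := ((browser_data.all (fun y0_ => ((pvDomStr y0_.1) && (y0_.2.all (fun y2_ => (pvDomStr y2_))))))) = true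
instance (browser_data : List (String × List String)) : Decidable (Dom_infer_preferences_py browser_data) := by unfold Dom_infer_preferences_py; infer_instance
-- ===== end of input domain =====

-- B replaces A's three independent any() scans with one loop carrying three flags that
-- lowercases each search once and breaks as soon as all three flags are set (objective: alternative decomposition).

-- dict.get(k, dflt) ported by hand as first-match association-list lookup
-- (exact: a Python dict has unique keys, so first match is the match). Shared by both ports.
def pyDictGet (d : List (String × List String)) (k : String) (dflt : List String) : List String :=
  match d.find? (fun p => p.1 == k) with
  | some p => p.2
  | none => dflt

-- ===== PORT A =====
def infer_preferences_py (browser_data : List (String × List String)) : List (String × Bool) :=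
  let recent_searches := pyDictGet browser_data "recent_searches" []
  [("prefersDirect",
      recent_searches.any (fun s =>
        PySem.Str.isIn "direct" (PySem.Str.lower s) || PySem.Str.isIn "nonstop" (PySem.Str.lower s))),
   ("budgetConscious",
      recent_searches.any (fun s =>
        PySem.Str.isIn "cheap" (PySem.Str.lower s) || PySem.Str.isIn "budget" (PySem.Str.lower s))),
   ("luxurySeeker",
      recent_searches.any (fun s =>
        PySem.Str.isIn "luxury" (PySem.Str.lower s) || PySem.Str.isIn "5 star" (PySem.Str.lower s)))]

-- ===== PORT B =====
-- the for-loop of Source B: three flags, early break once all three are true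
def loopB : List String → Bool → Bool → Bool → Bool × Bool × Bool
  | [], direct, cheap, lux => (direct, cheap, lux)
  | s :: rest, direct, cheap, lux =>
    let t := PySem.Str.lower s
    let direct' := direct || PySem.Str.isIn "direct" t || PySem.Str.isIn "nonstop" t
    let cheap' := cheap || PySem.Str.isIn "cheap" t || PySem.Str.isIn "budget" t
    let lux' := lux || PySem.Str.isIn "luxury" t || PySem.Str.isIn "5 star" t
    if direct' && cheap' && lux' then (direct', cheap', lux')
    else loopB rest direct' cheap' lux'

def infer_preferences_py_alt (browser_data : List (String × List String)) : List (String × Bool) :=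
  let recent_searches := pyDictGet browser_data "recent_searches" []
  let r := loopB recent_searches false false false
  [("prefersDirect", r.1), ("budgetConscious", r.2.1), ("luxurySeeker", r.2.2)]

-- ===== PRECONDITION & SPEC =====
def Spec_infer_preferences_py (browser_data : List (String × List String)) (out : List (String × Bool)) : Prop := out = infer_preferences_py_alt browser_data
instance (browser_data : List (String × List String)) (out : List (String × Bool)) : Decidable (Spec_infer_preferences_py browser_data out) := by unfold Spec_infer_preferences_py; infer_instance

-- ===== CLAIM (what is proved, stated in full; the proofs are below) =====
def Claim_equal_infer_preferences_py : Prop := ∀ (browser_data : List (String × List String)), Dom_infer_preferences_py browser_data → Spec_infer_preferences_py browser_data (infer_preferences_py browser_data)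

-- ===== LEMMAS AND PROOFS =====

-- loop invariant: loopB computes the three any()-scans, each OR-ed onto its incoming flag
lemma loopB_eq (xs : List String) (d c l : Bool) :
    loopB xs d c l =
      (d || xs.any (fun s =>
          PySem.Str.isIn "direct" (PySem.Str.lower s) || PySem.Str.isIn "nonstop" (PySem.Str.lower s)),
       c || xs.any (fun s =>
          PySem.Str.isIn "cheap" (PySem.Str.lower s) || PySem.Str.isIn "budget" (PySem.Str.lower s)),
       l || xs.any (fun s =>
          PySem.Str.isIn "luxury" (PySem.Str.lower s) || PySem.Str.isIn "5 star" (PySem.Str.lower s))) := by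
  induction xs generalizing d c l with
  | nil => simp [loopB]
  | cons s rest ih =>
    simp only [loopB, List.any_cons]
    generalize PySem.Str.isIn "direct" (PySem.Str.lower s) = A1
    generalize PySem.Str.isIn "nonstop" (PySem.Str.lower s) = A2
    generalize PySem.Str.isIn "cheap" (PySem.Str.lower s) = B1
    generalize PySem.Str.isIn "budget" (PySem.Str.lower s) = B2
    generalize PySem.Str.isIn "luxury" (PySem.Str.lower s) = C1
    generalize PySem.Str.isIn "5 star" (PySem.Str.lower s) = C2
    rw [ih]
    generalize rest.any (fun s =>
        PySem.Str.isIn "direct" (PySem.Str.lower s) || PySem.Str.isIn "nonstop" (PySem.Str.lower s)) = R1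
    generalize rest.any (fun s =>
        PySem.Str.isIn "cheap" (PySem.Str.lower s) || PySem.Str.isIn "budget" (PySem.Str.lower s)) = R2
    generalize rest.any (fun s =>
        PySem.Str.isIn "luxury" (PySem.Str.lower s) || PySem.Str.isIn "5 star" (PySem.Str.lower s)) = R3
    split_ifs with h
    · simp only [Bool.and_eq_true] at h
      obtain ⟨⟨hd, hc⟩, hl⟩ := h
      simp only [Prod.mk.injEq]
      refine ⟨?_, ?_, ?_⟩
      · cases d <;> cases A1 <;> cases A2 <;> simp_all
      · cases c <;> cases B1 <;> cases B2 <;> simp_all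
      · cases l <;> cases C1 <;> cases C2 <;> simp_all
    · simp only [Prod.mk.injEq]
      refine ⟨?_, ?_, ?_⟩ <;> simp [Bool.or_assoc]

-- ===== VERDICT (by name: the statement is the Claim_ definition above) =====
theorem infer_preferences_py_spec : Claim_equal_infer_preferences_py := by
  intro browser_data _
  unfold Spec_infer_preferences_py infer_preferences_py infer_preferences_py_alt
  simp only [loopB_eq, Bool.false_or]
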